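-- pv_equiv track=rewrite | github.com/harshit779921/GFG-Questions | Difficulty: Easy/Most Frequent Character/most-frequent-character.py | getMaxOccurringChar
-- ===== SOURCE A (Python) =====
-- def getMaxOccurringChar(s):
--     freq = {}
--
--     # Count frequency of each character
--     for ch in s:
--         if ch in freq:
--             freq[ch] += 1
--         else:
--             freq[ch] = 1
--
--     # Sort dictionary by key (character)
--     freq = dict(sorted(freq.items()))
--
--     # Find the maximum frequency
--     max_count = max(freq.values())
--
--     # Return the character with maximum count
--     # Alphabetically smallest will be returned first because dict is sorted
--     for key, val in freq.items():
--         if val == max_count: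
--             return key
-- ===== SOURCE B (Python) =====
-- def getMaxOccurringChar(s):
--     # No frequency dict at all: take the alphabetically-first distinct character
--     # with maximal count, via min over set(s) with key (-count, char).
--     return min(set(s), key=lambda c: (-s.count(c), c))
-- ===== Notes on version B (the rewrite author's own statement) =====
-- stated objective: faster
-- what changed: B builds no frequency dict and never computes the max count: it reduces the whole task to one min() over set(s) with the lexicographic key (-s.count(c), c), rescanning the string once per distinct character instead of counting char-by-char, sorting the dict and scanning for the max.
import Mathlib
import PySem

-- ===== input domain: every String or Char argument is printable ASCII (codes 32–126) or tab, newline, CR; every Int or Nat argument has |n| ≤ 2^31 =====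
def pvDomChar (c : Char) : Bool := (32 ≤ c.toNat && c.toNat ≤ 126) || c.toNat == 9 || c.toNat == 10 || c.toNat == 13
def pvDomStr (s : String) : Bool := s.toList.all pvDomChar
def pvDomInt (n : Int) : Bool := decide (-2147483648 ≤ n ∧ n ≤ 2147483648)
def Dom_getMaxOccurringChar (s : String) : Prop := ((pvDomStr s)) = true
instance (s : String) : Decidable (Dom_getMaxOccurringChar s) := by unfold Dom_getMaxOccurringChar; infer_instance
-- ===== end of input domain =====

-- B drops A's frequency dict, sort and max pass entirely: one min() over set(s)
-- with lexicographic key (-s.count(c), c); measured faster (C-level counting).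


-- ===== PORT A =====
-- keys of a dict are pairwise distinct, so Python's tuple comparison in
-- sorted(freq.items()) is decided by the key alone: sorting by fst is exact here
def getMaxOccurringChar (s : String) : String :=
  let freq := s.toList.foldl
    (fun d ch => if d.contains ch then d.insert ch (d.getD ch 0 + 1) else d.insert ch 1)
    (PySem.Dict.empty : PySem.Dict Char Int)
  let freq2 := PySem.Dict.ofList (PySem.List.sorted freq.items (fun p => p.1) false)
  match PySem.List.max? freq2.values (fun v => v) with
  | none => ""      -- max(()) raises ValueError in Python: excluded by Pre_
  | some m =>
    match freq2.items.find? (fun p => p.2 == m) with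
    | some p => String.ofList [p.1]
    | none => ""    -- unreachable: the maximum is attained by some item

-- ===== PORT B =====
-- min(set(s), key=lambda c: (-s.count(c), c)); s.count on a single character
-- equals the character count of the list of characters
def getMaxOccurringChar_alt (s : String) : String :=
  match PySem.List.min2? (PySem.Set.ofList s.toList)
      (fun c => -((s.toList.count c : Int))) (fun c => c) with
  | some c => String.ofList [c]
  | none => ""      -- min(set('')) raises ValueError in Python: excluded by Pre_

-- ===== PRECONDITION & SPEC =====
-- Pre_ excludes only the empty string, on which A's max() raises ValueError.
def Pre_getMaxOccurringChar (s : String) : Prop := s ≠ ""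
instance (s : String) : Decidable (Pre_getMaxOccurringChar s) := by
  unfold Pre_getMaxOccurringChar; infer_instance
def pvWitness_getMaxOccurringChar : String := "abracadabra"

def Spec_getMaxOccurringChar (s : String) (out : String) : Prop := out = getMaxOccurringChar_alt s
instance (s : String) (out : String) : Decidable (Spec_getMaxOccurringChar s out) := by
  unfold Spec_getMaxOccurringChar; infer_instance

-- ===== CLAIM (what is proved, stated in full; the proofs are below) =====
def Claim_equal_getMaxOccurringChar : Prop := ∀ (s : String), Dom_getMaxOccurringChar s → Pre_getMaxOccurringChar s → Spec_getMaxOccurringChar s (getMaxOccurringChar s)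

-- ===== LEMMAS AND PROOFS =====

-- A's count loop is the standard counter loop
lemma stepA_eq :
    (fun (d : PySem.Dict Char Int) ch =>
      if d.contains ch then d.insert ch (d.getD ch 0 + 1) else d.insert ch 1) =
    (fun (d : PySem.Dict Char Int) ch => d.insert ch (d.getD ch 0 + 1)) := by
  funext d ch
  by_cases h : d.contains ch
  · simp [h]
  · simp only [Bool.not_eq_true] at h
    simp [h, PySem.Dict.getD_of_not_contains]

lemma ofList_items_of_nodup (l : List (Char × Int)) (h : (l.map (·.1)).Nodup) :
    (PySem.Dict.ofList l).items = l := by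
  simp only [PySem.Dict.ofList, PySem.Dict.update]
  rw [PySem.Dict.items_foldl_insert_fresh l (·.1) (·.2)]
  · simp [PySem.Dict.empty]
  · simp [PySem.Dict.empty]
  · exact h

-- the running-minimum step of min2? with identity second key, named for rewriting
def minStep (k1 : Char → Int) (acc : Option Char) (x : Char) : Option Char :=
  match acc with
  | none => some x
  | some m => if (decide (k1 x < k1 m) || !decide (k1 m < k1 x) && decide (x < m)) = true
              then some x else some m

lemma min2?_eq_minStep (k1 : Char → Int) (l : List Char) :
    PySem.List.min2? l k1 (fun c => c) = l.foldl (minStep k1) none := by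
  unfold PySem.List.min2?
  congr 1
  funext acc x
  cases acc <;> rfl

-- lexicographic ≤ on (k1 ·, ·) is transitive
lemma lexle_trans (k1 : Char → Int) {a b c : Char}
    (h1 : k1 a < k1 b ∨ (k1 a = k1 b ∧ a ≤ b))
    (h2 : k1 b < k1 c ∨ (k1 b = k1 c ∧ b ≤ c)) :
    k1 a < k1 c ∨ (k1 a = k1 c ∧ a ≤ c) := by
  rcases h1 with h1 | ⟨e1, l1⟩ <;> rcases h2 with h2 | ⟨e2, l2⟩
  · exact Or.inl (h1.trans h2)
  · exact Or.inl (e2 ▸ h1)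
  · exact Or.inl (e1 ▸ h2)
  · exact Or.inr ⟨e1.trans e2, l1.trans l2⟩

-- B's min2? fold: invariant of the running lexicographic minimum
lemma min2_fold (k1 : Char → Int) :
    ∀ (l : List Char) (m0 : Char),
      ∃ m, l.foldl (minStep k1) (some m0) = some m ∧ (m = m0 ∨ m ∈ l) ∧
        (k1 m < k1 m0 ∨ (k1 m = k1 m0 ∧ m ≤ m0)) ∧
        ∀ y ∈ l, k1 m < k1 y ∨ (k1 m = k1 y ∧ m ≤ y) := by
  intro l
  induction l with
  | nil =>
    intro m0
    exact ⟨m0, rfl, Or.inl rfl, Or.inr ⟨rfl, le_refl _⟩, by simp⟩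
  | cons x t ih =>
    intro m0
    simp only [List.foldl_cons, minStep]
    by_cases h : (decide (k1 x < k1 m0) || !decide (k1 m0 < k1 x) && decide (x < m0)) = true
    · rw [if_pos h]
      obtain ⟨m, hf, hmem, hle, hall⟩ := ih x
      have hx : k1 x < k1 m0 ∨ (k1 x = k1 m0 ∧ x ≤ m0) := by
        simp only [Bool.or_eq_true, Bool.and_eq_true, Bool.not_eq_true', decide_eq_true_eq,
          decide_eq_false_iff_not] at h
        rcases h with h | ⟨h1, h2⟩
        · exact Or.inl h
        · rcases lt_or_eq_of_le (not_lt.mp h1) with hlt | heq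
          · exact Or.inl hlt
          · exact Or.inr ⟨heq, le_of_lt h2⟩
      refine ⟨m, hf, ?_, lexle_trans k1 hle hx, ?_⟩
      · rcases hmem with rfl | hm
        · exact Or.inr List.mem_cons_self
        · exact Or.inr (List.mem_cons_of_mem _ hm)
      · intro y hy
        rcases List.mem_cons.mp hy with rfl | hyt
        · exact hle
        · exact hall y hyt
    · rw [if_neg h]
      obtain ⟨m, hf, hmem, hle, hall⟩ := ih m0
      have hx : k1 m0 < k1 x ∨ (k1 m0 = k1 x ∧ m0 ≤ x) := by
        simp only [Bool.or_eq_true, Bool.and_eq_true, Bool.not_eq_true', decide_eq_true_eq,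
          decide_eq_false_iff_not, not_or, not_and] at h
        obtain ⟨h1, h2⟩ := h
        rcases lt_or_eq_of_le (not_lt.mp h1) with hlt | heq
        · exact Or.inl hlt
        · have := h2 (heq ▸ lt_irrefl _)
          exact Or.inr ⟨heq, not_lt.mp this⟩
      refine ⟨m, hf, ?_, hle, ?_⟩
      · rcases hmem with rfl | hm
        · exact Or.inl rfl
        · exact Or.inr (List.mem_cons_of_mem _ hm)
      · intro y hy
        rcases List.mem_cons.mp hy with rfl | hyt
        · exact lexle_trans k1 hle hx
        · exact hall y hyt

-- min2? with identity second key on a nonempty list: first lexicographic minimum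
lemma min2_spec (k1 : Char → Int) (l : List Char) (hne : l ≠ []) :
    ∃ m, PySem.List.min2? l k1 (fun c => c) = some m ∧ m ∈ l ∧
      ∀ y ∈ l, k1 m < k1 y ∨ (k1 m = k1 y ∧ m ≤ y) := by
  obtain ⟨h0, t0, rfl⟩ := List.exists_cons_of_ne_nil hne
  obtain ⟨m, hf, hmem, hle, hall⟩ := min2_fold k1 t0 h0
  refine ⟨m, ?_, ?_, ?_⟩
  · rw [min2?_eq_minStep, List.foldl_cons]
    exact hf
  · rcases hmem with rfl | hm
    · exact List.mem_cons_self
    · exact List.mem_cons_of_mem _ hm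
  · intro y hy
    rcases List.mem_cons.mp hy with rfl | hyt
    · exact hle
    · exact hall y hyt

-- ===== VERDICT (by name: the statement is the Claim_ definition above) =====
theorem getMaxOccurringChar_spec : Claim_equal_getMaxOccurringChar := by
  intro s _ hpre
  unfold Spec_getMaxOccurringChar getMaxOccurringChar getMaxOccurringChar_alt
  simp only [stepA_eq]
  simp only [PySem.Dict.foldl_insert_getD_add_one_eq_counter]
  have hL : s.toList ≠ [] := by
    intro h
    exact hpre (by simpa using congrArg String.ofList h)
  set L := s.toList with hLdef
  set C := PySem.Dict.counter (κ := Char) L with hC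
  have hitems : C.items = (PySem.Set.ofList L).map (fun k => (k, (L.count k : Int))) :=
    PySem.Dict.items_counter L
  have hfstnodup : (C.items.map (·.1)).Nodup := by
    rw [hitems, List.map_map]
    have hid : ((fun (x : Char × Int) => x.1) ∘ fun k => (k, (L.count k : Int))) = fun k => k := rfl
    rw [hid, List.map_id']
    exact PySem.Set.nodup_ofList L
  set S := PySem.List.sorted C.items (fun p => p.1) false with hS
  have hperm : S.Perm C.items := PySem.List.sorted_perm C.items (fun p => p.1) false
  have hSfst : (S.map (·.1)).Nodup := ((hperm.map (·.1)).nodup_iff).mpr hfstnodup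
  have hpairlt : S.Pairwise (fun a b => a.1 < b.1) := by
    have h1 : S.Pairwise (fun a b => a.1 ≤ b.1) := PySem.List.sorted_pairwise C.items (fun p => p.1)
    have h2 : S.Pairwise (fun a b => a.1 ≠ b.1) := List.pairwise_map.mp hSfst
    exact (h1.and h2).imp (fun h => lt_of_le_of_ne h.1 h.2)
  have hfreq2 : (PySem.Dict.ofList S).items = S := ofList_items_of_nodup S hSfst
  have hvals2 : (PySem.Dict.ofList S).values = S.map (·.2) := by
    simp [PySem.Dict.values, hfreq2]
  have hofLne : PySem.Set.ofList L ≠ [] := by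
    obtain ⟨c, t, hct⟩ := List.exists_cons_of_ne_nil hL
    intro h
    exact (List.ne_nil_of_mem ((PySem.Set.mem_ofList L c).mpr (hct ▸ List.mem_cons_self))) h
  have hCne : C.items ≠ [] := by
    rw [hitems]
    intro h
    exact hofLne (List.map_eq_nil_iff.mp h)
  have hSne : S ≠ [] := by
    intro h
    apply hCne
    have hlen := hperm.length_eq
    rw [h] at hlen
    exact List.eq_nil_of_length_eq_zero hlen.symm
  rw [hvals2, hfreq2]
  -- A's max count
  obtain ⟨m', hmA⟩ : ∃ m', PySem.List.max? (S.map (·.2)) (fun v => v) = some m' := by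
    refine Option.ne_none_iff_exists'.mp (fun h => ?_)
    exact hSne (List.map_eq_nil_iff.mp ((PySem.List.max?_eq_none_iff _ _).mp h))
  -- A's returned item: first sorted item with maximal count
  obtain ⟨pM, hpMS, hpM2⟩ : ∃ p ∈ S, p.2 = m' := by
    have := PySem.List.max?_mem hmA
    simpa using this
  obtain ⟨pA, hfind⟩ : ∃ pA, S.find? (fun p => p.2 == m') = some pA := by
    refine Option.ne_none_iff_exists'.mp (fun h => ?_)
    rw [List.find?_eq_none] at h
    exact absurd (by simpa using hpM2) (by simpa using h pM hpMS)
  obtain ⟨hpredA, as, bs, hsplit, has⟩ := List.find?_eq_some_iff_append.mp hfind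
  have hpA2 : pA.2 = m' := by simpa using hpredA
  have hpAS : pA ∈ S := by rw [hsplit]; exact List.mem_append_right _ List.mem_cons_self
  have hmax : ∀ q ∈ S, q.2 ≤ m' := by
    intro q hq
    have := PySem.List.max?_isMax hmA q.2 (List.mem_map_of_mem hq)
    simpa using this
  have hmin : ∀ q ∈ S, q.2 = m' → pA.1 ≤ q.1 := by
    intro q hq hq2
    rw [hsplit] at hq
    rcases List.mem_append.mp hq with hqa | hqb
    · have := has q hqa
      simp [hq2] at this
    · rcases List.mem_cons.mp hqb with rfl | hqbs
      · exact le_refl _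
      · have hp2 := hpairlt
        rw [hsplit] at hp2
        have h3 := hp2.sublist (List.sublist_append_right as _)
        exact le_of_lt ((List.pairwise_cons.mp h3).1 q hqbs)
  -- each distinct character's pair is an item of S
  have hpair_mem : ∀ c ∈ PySem.Set.ofList L, (c, (L.count c : Int)) ∈ S := by
    intro c hc
    exact hperm.mem_iff.mpr (hitems ▸ List.mem_map_of_mem hc)
  -- A's character has maximal count
  have hpA_count : (L.count pA.1 : Int) = m' := by
    obtain ⟨k, hk, hpk⟩ := List.mem_map.mp (hitems ▸ hperm.subset hpAS)
    have h1 : pA.1 = k := by rw [← hpk]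
    have h2 : pA.2 = (L.count k : Int) := by rw [← hpk]
    rw [h1, ← h2, hpA2]
  -- B's minimum
  obtain ⟨mB, hmB, hmBmem, hmBall⟩ :=
    min2_spec (fun c => -((L.count c : Int))) (PySem.Set.ofList L) hofLne
  -- B's character also has maximal count
  have hmB_le : (L.count mB : Int) ≤ m' := by
    have := hmax _ (hpair_mem mB hmBmem)
    simpa using this
  have hpA_in_set : pA.1 ∈ PySem.Set.ofList L := by
    obtain ⟨k, hk, hpk⟩ := List.mem_map.mp (hitems ▸ hperm.subset hpAS)
    have h1 : pA.1 = k := by rw [← hpk]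
    exact h1 ▸ hk
  have hmB_count : (L.count mB : Int) = m' := by
    rcases hmBall pA.1 hpA_in_set with hlt | ⟨heq, _⟩
    · have : (L.count pA.1 : Int) < (L.count mB : Int) := by
        have := neg_lt_neg_iff.mp hlt
        linarith
      omega
    · have : (L.count mB : Int) = (L.count pA.1 : Int) := by linarith [neg_inj.mp heq]
      rw [this, hpA_count]
  -- the two characters coincide
  have hchar : mB = pA.1 := by
    have h1 : pA.1 ≤ mB := hmin _ (hpair_mem mB hmBmem) (by simpa using hmB_count)
    have h2 : mB ≤ pA.1 := by
      rcases hmBall pA.1 hpA_in_set with hlt | ⟨_, hle⟩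
      · exfalso
        have : (L.count pA.1 : Int) < (L.count mB : Int) := by
          have := neg_lt_neg_iff.mp hlt
          linarith
        rw [hpA_count, hmB_count] at this
        exact lt_irrefl _ this
      · exact hle
    exact le_antisymm h2 h1
  rw [hmA, hmB]
  simp only [hfind, hchar]
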